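-- pv_equiv track=rewrite | github.com/YujiaZhao/vocal_match | test.py | group_phonemes
-- ===== SOURCE A (Python) =====
-- def is_vowel(ph):
--     # 简单判断音素是否为元音
--     vowels = {"a", "e", "i", "o", "u", "er", "ai", "ei", "ou", "an", "ang", "en", "eng", "ong","AP","SP"}
--     return ph in vowels
--
-- def group_phonemes(phoneme_seq):
--     """
--     根据元音/辅音组合规则进行分组，并生成初始 ph_num。
--     :param phoneme_seq: 音素序列（如 ['w', 'o', 'a', 'i', 'n', 'i']）
--     :return: 分组后的音素列表和对应的 ph_num
--     """
--     ph_groups = []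
--     ph_num = []
--     current_group = []
--
--     for ph in phoneme_seq:
--         current_group.append(ph)
--         if is_vowel(ph):  # 当遇到元音时，将当前音素组作为一个整体
--             ph_groups.append(current_group)
--             ph_num.append(len(current_group))
--             current_group = []
--
--     # 处理剩余的音素
--     if current_group:
--         ph_groups.append(current_group)
--         ph_num.append(len(current_group))
--
--     return ph_groups, ph_num
-- ===== SOURCE B (Python) =====
-- def is_vowel(ph):
--     # 简单判断音素是否为元音
--     vowels = {"a", "e", "i", "o", "u", "er", "ai", "ei", "ou", "an", "ang", "en", "eng", "ong","AP","SP"}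
--     return ph in vowels
--
-- def _first_vowel_index(seq):
--     for i, ph in enumerate(seq):
--         if is_vowel(ph):
--             return i
--     return None
--
-- def group_phonemes(phoneme_seq):
--     # Split the sequence at each first vowel of the remaining tail;
--     # lengths are computed afterwards in one second pass.
--     groups = []
--     rest = phoneme_seq
--     while rest:
--         i = _first_vowel_index(rest)
--         if i is None:
--             groups.append(rest)
--             break
--         groups.append(rest[:i + 1])
--         rest = rest[i + 1:]
--     return groups, [len(g) for g in groups]
-- ===== Notes on version B (the rewrite author's own statement) =====
-- stated objective: alternative
-- what changed: B repeatedly splits the remaining sequence at its first vowel (slice per group, lengths computed afterwards in a second pass) instead of A's single accumulator loop that grows and flushes a current group and its count in lockstep.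
import Mathlib
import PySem

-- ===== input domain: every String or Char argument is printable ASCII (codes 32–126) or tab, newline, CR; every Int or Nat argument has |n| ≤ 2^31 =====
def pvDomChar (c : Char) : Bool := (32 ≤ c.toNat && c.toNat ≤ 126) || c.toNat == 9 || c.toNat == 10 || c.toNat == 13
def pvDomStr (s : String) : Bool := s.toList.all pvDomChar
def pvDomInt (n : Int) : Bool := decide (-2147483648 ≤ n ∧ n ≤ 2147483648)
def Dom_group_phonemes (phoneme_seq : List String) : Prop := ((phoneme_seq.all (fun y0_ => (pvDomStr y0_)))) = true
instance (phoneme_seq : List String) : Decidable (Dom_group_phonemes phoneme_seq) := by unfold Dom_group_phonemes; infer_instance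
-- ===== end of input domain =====

-- B splits the remaining sequence at its first vowel (slice per group, lengths in a second pass)
-- instead of A's accumulator loop; alternative decomposition, same O(n) cost.


-- ===== PORT A =====
-- shared module-level helper (both Pythons define the same is_vowel)
def is_vowel (ph : String) : Bool :=
  ["a", "e", "i", "o", "u", "er", "ai", "ei", "ou", "an", "ang", "en", "eng", "ong", "AP", "SP"].contains ph

-- one step of A's for-loop over (ph_groups, ph_num, current_group)
def stepA (st : List (List String) × List Int × List String) (ph : String) :
    List (List String) × List Int × List String :=
  let cur := st.2.2 ++ [ph]
  if is_vowel ph then (st.1 ++ [cur], st.2.1 ++ [(cur.length : Int)], ([] : List String))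
  else (st.1, st.2.1, cur)

-- A's trailing 'if current_group:' flush
def finA (st : List (List String) × List Int × List String) : List (List String) × List Int :=
  if st.2.2 ≠ [] then (st.1 ++ [st.2.2], st.2.1 ++ [(st.2.2.length : Int)]) else (st.1, st.2.1)

def group_phonemes (phoneme_seq : List String) : List (List String) × List Int :=
  finA (phoneme_seq.foldl stepA (([], [], []) : List (List String) × List Int × List String))

-- ===== PORT B =====
-- B's _first_vowel_index: index of the first vowel, None if there is none
def firstVowelIdx : List String → Option Nat
  | [] => none
  | ph :: rest => if is_vowel ph then some 0 else (firstVowelIdx rest).map (· + 1)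

-- B's while-loop: peel off the slice up to (and including) the first vowel
def splitPh (seq : List String) : List (List String) :=
  match seq with
  | [] => []
  | x :: xs =>
    match firstVowelIdx (x :: xs) with
    | some i => ((x :: xs).take (i + 1)) :: splitPh ((x :: xs).drop (i + 1))
    | none => [x :: xs]
termination_by seq.length
decreasing_by simp [List.length_drop]

def group_phonemes_alt (phoneme_seq : List String) : List (List String) × List Int :=
  let groups := splitPh phoneme_seq
  (groups, groups.map (fun g => (g.length : Int)))

-- ===== PRECONDITION & SPEC =====
def Spec_group_phonemes (phoneme_seq : List String) (out : List (List String) × List Int) : Prop := out = group_phonemes_alt phoneme_seq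
instance (phoneme_seq : List String) (out : List (List String) × List Int) : Decidable (Spec_group_phonemes phoneme_seq out) := by unfold Spec_group_phonemes; infer_instance

-- ===== CLAIM (what is proved, stated in full; the proofs are below) =====
def Claim_equal_group_phonemes : Prop := ∀ (phoneme_seq : List String), Dom_group_phonemes phoneme_seq → Spec_group_phonemes phoneme_seq (group_phonemes phoneme_seq)

-- ===== LEMMAS AND PROOFS =====

-- common recursive characterisation: groups of seq, current partial group cur
def grp : List String → List String → List (List String)
  | cur, [] => if cur = [] then [] else [cur]
  | cur, ph :: rest => if is_vowel ph then (cur ++ [ph]) :: grp [] rest else grp (cur ++ [ph]) rest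

lemma foldl_stepA_grp (seq : List String) : ∀ (G : List (List String)) (N : List Int) (C : List String),
    finA (seq.foldl stepA (G, N, C)) =
      (G ++ grp C seq, N ++ (grp C seq).map (fun g => (g.length : Int))) := by
  induction seq with
  | nil =>
    intro G N C
    simp only [List.foldl, grp, finA]
    by_cases h : C = [] <;> simp [h]
  | cons ph rest ih =>
    intro G N C
    simp only [List.foldl, grp, stepA]
    by_cases h : is_vowel ph <;> simp [h, ih, List.append_assoc]

lemma grp_firstVowel (seq : List String) : ∀ (cur : List String),
    (∀ i, firstVowelIdx seq = some i →
      grp cur seq = (cur ++ seq.take (i + 1)) :: grp [] (seq.drop (i + 1))) ∧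
    (firstVowelIdx seq = none →
      grp cur seq = if (cur ++ seq) = [] then [] else [cur ++ seq]) := by
  induction seq with
  | nil =>
    intro cur
    refine ⟨fun i h => by simp [firstVowelIdx] at h, fun _ => by simp [grp]⟩
  | cons ph rest ih =>
    intro cur
    constructor
    · intro i h
      by_cases hv : is_vowel ph
      · simp [firstVowelIdx, hv] at h
        subst h
        simp [grp, hv]
      · simp [firstVowelIdx, hv] at h
        obtain ⟨j, hj, rfl⟩ := h
        have := ((ih (cur ++ [ph])).1 j hj)
        simp [grp, hv, this, List.append_assoc]
    · intro h
      by_cases hv : is_vowel ph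
      · simp [firstVowelIdx, hv] at h
      · simp [firstVowelIdx, hv] at h
        have := (ih (cur ++ [ph])).2 (by simp [h])
        simp [grp, hv, this, List.append_assoc]

lemma splitPh_eq_grp : ∀ (n : Nat) (seq : List String), seq.length ≤ n → splitPh seq = grp [] seq := by
  intro n
  induction n with
  | zero =>
    intro seq h
    have : seq = [] := List.length_eq_zero_iff.mp (Nat.le_zero.mp h)
    subst this; rw [splitPh.eq_def]; simp [grp]
  | succ n ih =>
    intro seq h
    match seq with
    | [] => rw [splitPh.eq_def]; simp [grp]
    | x :: xs =>
      cases hf : firstVowelIdx (x :: xs) with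
      | some i =>
        have hrec := ih ((x :: xs).drop (i + 1))
          (by simp only [List.length_drop, List.length_cons] at h ⊢; omega)
        rw [splitPh.eq_def]
        simp only [hf, hrec]
        rw [((grp_firstVowel (x :: xs)) []).1 i hf]
        simp
      | none =>
        rw [splitPh.eq_def]
        simp only [hf]
        rw [((grp_firstVowel (x :: xs)) []).2 hf]
        simp

-- ===== VERDICT (by name: the statement is the Claim_ definition above) =====
theorem group_phonemes_spec : Claim_equal_group_phonemes := by
  intro seq _
  unfold Spec_group_phonemes group_phonemes group_phonemes_alt
  rw [foldl_stepA_grp seq [] [] [], splitPh_eq_grp seq.length seq le_rfl]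
  simp
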